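-- pv_equiv track=rewrite | github.com/amanyrath/spend | src/utils/plaid_categories.py | get_category_for_merchant
-- ===== SOURCE A (Python) =====
-- from typing import List, Tuple
--
-- LEGACY_TO_PLAID_CATEGORIES = {
--     "groceries": ["Food and Drink", "Groceries"],
--     "restaurants": ["Food and Drink", "Restaurants"],
--     "bills": ["General Services", "Utilities"],
--     "shopping": ["General Merchandise", "Department Stores"],
--     "entertainment": ["Entertainment", "Streaming Services"],
--     "gas": ["Gas Stations", "Gas Stations"],
--     "subscriptions": ["Entertainment", "Streaming Services"],
--     "transfer": ["Transfer", "Transfer"],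
--     "rent": ["Rent And Utilities", "Rent"],
--     "mortgage": ["Rent And Utilities", "Mortgage"],
--     "auto_loan": ["Loan Payments", "Auto Loan Payment"],
--     "student_loan": ["Loan Payments", "Student Loan Payment"],
--     "healthcare": ["Healthcare", "Doctors"],
--     "insurance": ["Insurance", "Health Insurance"],
--     "education": ["Education", "Tuition"],
-- }
--
-- def get_plaid_category(legacy_category: str) -> List[str]:
--     """Convert legacy category to Plaid category array.
--
--     Args:
--         legacy_category: Legacy category string (e.g., "groceries")
--
--     Returns:
--         Plaid category array (e.g., ["Food and Drink", "Groceries"])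
--     """
--     return LEGACY_TO_PLAID_CATEGORIES.get(
--         legacy_category.lower(),
--         ["General Merchandise", "Other"]
--     )
--
-- def get_category_for_merchant(merchant_name: str, category_hint: str = None) -> List[str]:
--     """Get appropriate Plaid category for a merchant.
--
--     Args:
--         merchant_name: Name of the merchant
--         category_hint: Optional hint about the category
--
--     Returns:
--         Plaid category array
--     """
--     merchant_lower = merchant_name.lower()
--
--     # Grocery stores
--     if any(term in merchant_lower for term in ['whole foods', 'kroger', 'safeway', 'trader joe', 'walmart', 'target']):
--         if 'walmart' in merchant_lower or 'target' in merchant_lower: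
--             return ["General Merchandise", "Department Stores"]
--         return ["Food and Drink", "Groceries"]
--
--     # Restaurants
--     if any(term in merchant_lower for term in ['starbucks', 'mcdonald', 'chipotle', 'olive garden', 'pizza']):
--         return ["Food and Drink", "Restaurants"]
--
--     # Gas stations
--     if any(term in merchant_lower for term in ['shell', 'exxon', 'chevron', 'bp', 'gas']):
--         return ["Gas Stations", "Gas Stations"]
--
--     # Streaming services
--     if any(term in merchant_lower for term in ['netflix', 'spotify', 'disney', 'hulu', 'youtube premium']):
--         return ["Entertainment", "Streaming Services"]
--
--     # Utilities
--     if any(term in merchant_lower for term in ['electric', 'water', 'utility', 'internet', 'phone company']):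
--         return ["General Services", "Utilities"]
--
--     # Shopping
--     if any(term in merchant_lower for term in ['amazon', 'best buy', 'macy', 'home depot']):
--         return ["General Merchandise", "Department Stores"]
--
--     # Use category hint if provided
--     if category_hint:
--         return get_plaid_category(category_hint)
--
--     # Default
--     return ["General Merchandise", "Other"]
-- ===== SOURCE B (Python) =====
-- from typing import List
--
-- LEGACY_TO_PLAID_CATEGORIES = {
--     "groceries": ["Food and Drink", "Groceries"],
--     "restaurants": ["Food and Drink", "Restaurants"],
--     "bills": ["General Services", "Utilities"],
--     "shopping": ["General Merchandise", "Department Stores"],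
--     "entertainment": ["Entertainment", "Streaming Services"],
--     "gas": ["Gas Stations", "Gas Stations"],
--     "subscriptions": ["Entertainment", "Streaming Services"],
--     "transfer": ["Transfer", "Transfer"],
--     "rent": ["Rent And Utilities", "Rent"],
--     "mortgage": ["Rent And Utilities", "Mortgage"],
--     "auto_loan": ["Loan Payments", "Auto Loan Payment"],
--     "student_loan": ["Loan Payments", "Student Loan Payment"],
--     "healthcare": ["Healthcare", "Doctors"],
--     "insurance": ["Insurance", "Health Insurance"],
--     "education": ["Education", "Tuition"],
-- }
--
-- def get_plaid_category(legacy_category: str) -> List[str]: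
--     return LEGACY_TO_PLAID_CATEGORIES.get(
--         legacy_category.lower(),
--         ["General Merchandise", "Other"]
--     )
--
-- # Dictionary-matching approach: instead of searching each keyword inside the
-- # merchant name, enumerate the substrings of the (lowercased) merchant name and
-- # hash-look them up in a flat keyword -> priority table; the smallest priority
-- # found wins.  Priority 0 (walmart/target) below 1 (grocery terms) reproduces
-- # the original department-store-beats-groceries precedence.
-- TERM_PRIORITY = {
--     'walmart': 0, 'target': 0,
--     'whole foods': 1, 'kroger': 1, 'safeway': 1, 'trader joe': 1,
--     'starbucks': 2, 'mcdonald': 2, 'chipotle': 2, 'olive garden': 2, 'pizza': 2,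
--     'shell': 3, 'exxon': 3, 'chevron': 3, 'bp': 3, 'gas': 3,
--     'netflix': 4, 'spotify': 4, 'disney': 4, 'hulu': 4, 'youtube premium': 4,
--     'electric': 5, 'water': 5, 'utility': 5, 'internet': 5, 'phone company': 5,
--     'amazon': 6, 'best buy': 6, 'macy': 6, 'home depot': 6,
-- }
--
-- CATEGORY_BY_PRIORITY = [
--     ["General Merchandise", "Department Stores"],
--     ["Food and Drink", "Groceries"],
--     ["Food and Drink", "Restaurants"],
--     ["Gas Stations", "Gas Stations"],
--     ["Entertainment", "Streaming Services"],
--     ["General Services", "Utilities"],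
--     ["General Merchandise", "Department Stores"],
-- ]
--
-- def get_category_for_merchant(merchant_name: str, category_hint: str = None) -> List[str]:
--     ml = merchant_name.lower()
--     n = len(ml)
--     best = 7
--     for i in range(n):
--         for L in range(2, 16):  # keyword lengths are 2..15
--             if i + L <= n:
--                 p = TERM_PRIORITY.get(ml[i:i + L])
--                 if p is not None and p < best:
--                     best = p
--     if best < 7:
--         return CATEGORY_BY_PRIORITY[best]
--     if category_hint:
--         return get_plaid_category(category_hint)
--     return ["General Merchandise", "Other"]
-- ===== Notes on version B (the rewrite author's own statement) =====
-- stated objective: alternative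
-- what changed: Replaces the keyword-by-keyword substring searches of the if-chain by a dictionary-matching scan: every substring of the lowercased merchant name (lengths 2-15) is hash-looked up in a flat keyword->priority table and the minimum priority found selects the category, with walmart/target at priority 0 so the nested special case disappears.
import Mathlib
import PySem

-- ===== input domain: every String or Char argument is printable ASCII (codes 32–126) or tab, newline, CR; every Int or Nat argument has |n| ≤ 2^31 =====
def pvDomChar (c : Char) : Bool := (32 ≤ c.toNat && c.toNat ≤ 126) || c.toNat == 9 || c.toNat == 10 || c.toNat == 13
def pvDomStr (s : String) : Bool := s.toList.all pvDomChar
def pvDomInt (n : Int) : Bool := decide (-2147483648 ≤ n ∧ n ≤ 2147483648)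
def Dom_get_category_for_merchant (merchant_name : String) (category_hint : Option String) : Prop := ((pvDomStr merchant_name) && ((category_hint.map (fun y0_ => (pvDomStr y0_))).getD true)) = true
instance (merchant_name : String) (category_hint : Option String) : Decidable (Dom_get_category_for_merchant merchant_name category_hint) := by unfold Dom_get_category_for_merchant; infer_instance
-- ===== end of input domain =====

-- B replaces A's per-keyword substring searches by a dictionary-matching scan (substrings of the merchant name hash-looked up in a flat keyword->priority table, minimum priority wins); alternative algorithm, same behaviour.


-- ===== PORT A =====
def LEGACY_TO_PLAID_CATEGORIES : PySem.Dict String (List String) :=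
  PySem.Dict.ofList [
    ("groceries", ["Food and Drink", "Groceries"]),
    ("restaurants", ["Food and Drink", "Restaurants"]),
    ("bills", ["General Services", "Utilities"]),
    ("shopping", ["General Merchandise", "Department Stores"]),
    ("entertainment", ["Entertainment", "Streaming Services"]),
    ("gas", ["Gas Stations", "Gas Stations"]),
    ("subscriptions", ["Entertainment", "Streaming Services"]),
    ("transfer", ["Transfer", "Transfer"]),
    ("rent", ["Rent And Utilities", "Rent"]),
    ("mortgage", ["Rent And Utilities", "Mortgage"]),
    ("auto_loan", ["Loan Payments", "Auto Loan Payment"]),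
    ("student_loan", ["Loan Payments", "Student Loan Payment"]),
    ("healthcare", ["Healthcare", "Doctors"]),
    ("insurance", ["Insurance", "Health Insurance"]),
    ("education", ["Education", "Tuition"])]

def get_plaid_category (legacy_category : String) : List String :=
  LEGACY_TO_PLAID_CATEGORIES.getD (PySem.Str.lower legacy_category)
    ["General Merchandise", "Other"]

def get_category_for_merchant (merchant_name : String) (category_hint : Option String) : List String :=
  let ml := PySem.Str.lower merchant_name
  if ["whole foods", "kroger", "safeway", "trader joe", "walmart", "target"].any
      (fun t => PySem.Str.isIn t ml) then
    if PySem.Str.isIn "walmart" ml || PySem.Str.isIn "target" ml then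
      ["General Merchandise", "Department Stores"]
    else
      ["Food and Drink", "Groceries"]
  else if ["starbucks", "mcdonald", "chipotle", "olive garden", "pizza"].any
      (fun t => PySem.Str.isIn t ml) then
    ["Food and Drink", "Restaurants"]
  else if ["shell", "exxon", "chevron", "bp", "gas"].any (fun t => PySem.Str.isIn t ml) then
    ["Gas Stations", "Gas Stations"]
  else if ["netflix", "spotify", "disney", "hulu", "youtube premium"].any
      (fun t => PySem.Str.isIn t ml) then
    ["Entertainment", "Streaming Services"]
  else if ["electric", "water", "utility", "internet", "phone company"].any
      (fun t => PySem.Str.isIn t ml) then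
    ["General Services", "Utilities"]
  else if ["amazon", "best buy", "macy", "home depot"].any (fun t => PySem.Str.isIn t ml) then
    ["General Merchandise", "Department Stores"]
  else
    match category_hint with    -- `if category_hint:` — truthy iff present and non-empty
    | some h => if h == "" then ["General Merchandise", "Other"] else get_plaid_category h
    | none => ["General Merchandise", "Other"]

-- ===== PORT B =====
def TERM_PRIORITY : PySem.Dict String Int :=
  PySem.Dict.ofList [
    ("walmart", 0), ("target", 0),
    ("whole foods", 1), ("kroger", 1), ("safeway", 1), ("trader joe", 1),
    ("starbucks", 2), ("mcdonald", 2), ("chipotle", 2), ("olive garden", 2), ("pizza", 2),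
    ("shell", 3), ("exxon", 3), ("chevron", 3), ("bp", 3), ("gas", 3),
    ("netflix", 4), ("spotify", 4), ("disney", 4), ("hulu", 4), ("youtube premium", 4),
    ("electric", 5), ("water", 5), ("utility", 5), ("internet", 5), ("phone company", 5),
    ("amazon", 6), ("best buy", 6), ("macy", 6), ("home depot", 6)]

def CATEGORY_BY_PRIORITY : List (List String) :=
  [ ["General Merchandise", "Department Stores"],
    ["Food and Drink", "Groceries"],
    ["Food and Drink", "Restaurants"],
    ["Gas Stations", "Gas Stations"],
    ["Entertainment", "Streaming Services"],
    ["General Services", "Utilities"],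
    ["General Merchandise", "Department Stores"] ]

-- body of the double loop: `if i + L <= n: p = TERM_PRIORITY.get(ml[i:i+L]); if p is not None and p < best: best = p`
def pvStep (ml : String) (n best i L : Int) : Int :=
  if i + L ≤ n then
    match TERM_PRIORITY.get? (PySem.Str.slice ml (some i) (some (i + L))) with
    | some p => if p < best then p else best
    | none => best
  else best

-- `best = 7; for i in range(n): for L in range(2, 16): ...`
def pvBest (ml : String) (n : Int) : Int :=
  (PySem.List.pyRange 0 n 1).foldl
    (fun b i => (PySem.List.pyRange 2 16 1).foldl (fun b L => pvStep ml n b i L) b) 7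

def get_category_for_merchant_alt (merchant_name : String) (category_hint : Option String) : List String :=
  let ml := PySem.Str.lower merchant_name
  let best := pvBest ml (PySem.Str.len ml)
  if best < 7 then
    (PySem.List.pyGet? CATEGORY_BY_PRIORITY best).getD []   -- index always in range: 0 ≤ best < 7
  else
    match category_hint with    -- `if category_hint:` — truthy iff present and non-empty
    | some h => if h == "" then ["General Merchandise", "Other"] else get_plaid_category h
    | none => ["General Merchandise", "Other"]

-- ===== PRECONDITION & SPEC =====
def Spec_get_category_for_merchant (merchant_name : String) (category_hint : Option String) (out : List String) : Prop := out = get_category_for_merchant_alt merchant_name category_hint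
instance (merchant_name : String) (category_hint : Option String) (out : List String) : Decidable (Spec_get_category_for_merchant merchant_name category_hint out) := by unfold Spec_get_category_for_merchant; infer_instance

-- ===== CLAIM (what is proved, stated in full; the proofs are below) =====
def Claim_equal_get_category_for_merchant : Prop := ∀ (merchant_name : String) (category_hint : Option String), Dom_get_category_for_merchant merchant_name category_hint → Spec_get_category_for_merchant merchant_name category_hint (get_category_for_merchant merchant_name category_hint)

-- ===== LEMMAS AND PROOFS =====
set_option maxHeartbeats 1000000

-- keyword groups by priority (proof helper)
def pvGroup (k : Int) : List String :=
  if k = 0 then ["walmart", "target"]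
  else if k = 1 then ["whole foods", "kroger", "safeway", "trader joe"]
  else if k = 2 then ["starbucks", "mcdonald", "chipotle", "olive garden", "pizza"]
  else if k = 3 then ["shell", "exxon", "chevron", "bp", "gas"]
  else if k = 4 then ["netflix", "spotify", "disney", "hulu", "youtube premium"]
  else if k = 5 then ["electric", "water", "utility", "internet", "phone company"]
  else if k = 6 then ["amazon", "best buy", "macy", "home depot"]
  else []

def pvG (ml : String) (k : Int) : Bool := (pvGroup k).any (fun t => PySem.Str.isIn t ml)

def pvChain (ml : String) : Int :=
  if pvG ml 0 then 0 else if pvG ml 1 then 1 else if pvG ml 2 then 2 else if pvG ml 3 then 3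
  else if pvG ml 4 then 4 else if pvG ml 5 then 5 else if pvG ml 6 then 6 else 7

-- the candidate looked up at (i, L), as an Option
def pvCand (ml : String) (n i L : Int) : Option Int :=
  if i + L ≤ n then TERM_PRIORITY.get? (PySem.Str.slice ml (some i) (some (i + L))) else none

def pvPairs (n : Int) : List (Int × Int) :=
  (PySem.List.pyRange 0 n 1).flatMap (fun i => (PySem.List.pyRange 2 16 1).map (fun L => (i, L)))

def pvFold (ml : String) (n : Int) : Int :=
  (pvPairs n).foldl (fun b ij => match pvCand ml n ij.1 ij.2 with
    | some p => if p < b then p else b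
    | none => b) 7

theorem pvStep_eq (ml : String) (n b i L : Int) :
    pvStep ml n b i L = match pvCand ml n i L with
      | some p => if p < b then p else b
      | none => b := by
  unfold pvStep pvCand; by_cases h : i + L ≤ n <;> simp [h]

theorem pv_flatten {α β γ : Type} (g : γ → α → β → γ) (l1 : List α) (l2 : List β) (c : γ) :
    l1.foldl (fun c i => l2.foldl (fun c j => g c i j) c) c
      = (l1.flatMap (fun i => l2.map (fun j => (i, j)))).foldl (fun c ij => g c ij.1 ij.2) c := by
  induction l1 generalizing c with
  | nil => rfl
  | cons a l ih => simp [List.foldl_append, List.foldl_map, ih]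

theorem pvBest_eq_fold (ml : String) (n : Int) : pvBest ml n = pvFold ml n := by
  unfold pvBest pvFold pvPairs
  rw [pv_flatten (fun b i L => pvStep ml n b i L)]
  congr 1; funext b ij; exact pvStep_eq ml n b ij.1 ij.2

theorem pv_foldl_le {α : Type} (f : α → Option Int) (l : List α) (b : Int) :
    l.foldl (fun b x => match f x with | some p => if p < b then p else b | none => b) b ≤ b := by
  induction l generalizing b with
  | nil => simp
  | cons a l ih =>
    simp only [List.foldl_cons]
    refine le_trans (ih _) ?_
    cases h : f a with
    | none => simp
    | some p => simp only []; split <;> omega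

theorem pv_foldl_le_cand {α : Type} (f : α → Option Int) (l : List α) (b : Int) (x : α) (p : Int)
    (hx : x ∈ l) (hp : f x = some p) :
    l.foldl (fun b x => match f x with | some p => if p < b then p else b | none => b) b ≤ p := by
  obtain ⟨l1, l2, rfl⟩ := List.append_of_mem hx
  rw [List.foldl_append, List.foldl_cons]
  refine le_trans (pv_foldl_le f l2 _) ?_
  simp only [hp]; split <;> omega

theorem pv_foldl_cases {α : Type} (f : α → Option Int) (l : List α) (b : Int) :
    l.foldl (fun b x => match f x with | some p => if p < b then p else b | none => b) b = b ∨
    ∃ x ∈ l, f x = some (l.foldl (fun b x => match f x with | some p => if p < b then p else b | none => b) b) := by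
  induction l generalizing b with
  | nil => left; rfl
  | cons a l ih =>
    simp only [List.foldl_cons]
    rcases ih (match f a with | some p => if p < b then p else b | none => b) with h | ⟨x, hx, hfx⟩
    · rw [h]
      cases hfa : f a with
      | none => left; simp
      | some p =>
        by_cases hpb : p < b
        · right; exact ⟨a, List.mem_cons_self, by simp [hfa, hpb]⟩
        · left; simp [hpb]
    · right; exact ⟨x, List.mem_cons_of_mem _ hx, hfx⟩

theorem pvFold_le7 (ml : String) (n : Int) : pvFold ml n ≤ 7 := by
  unfold pvFold; exact pv_foldl_le (fun ij => pvCand ml n ij.1 ij.2) (pvPairs n) 7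

theorem pvFold_le_cand (ml : String) (n i L p : Int) (hx : (i, L) ∈ pvPairs n)
    (hp : pvCand ml n i L = some p) : pvFold ml n ≤ p :=
  by unfold pvFold; exact pv_foldl_le_cand (fun ij => pvCand ml n ij.1 ij.2) (pvPairs n) 7 (i, L) p hx hp

theorem pvFold_cases (ml : String) (n : Int) :
    pvFold ml n = 7 ∨ ∃ ij ∈ pvPairs n, pvCand ml n ij.1 ij.2 = some (pvFold ml n) := by
  unfold pvFold; exact pv_foldl_cases (fun ij => pvCand ml n ij.1 ij.2) (pvPairs n) 7

-- dict lookup characterisations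
theorem pv_find?_pred {α : Type} (p : α → Bool) (l : List α) (a : α)
    (h : l.find? p = some a) : p a = true := by
  induction l with
  | nil => cases h
  | cons x xs ih =>
    rw [List.find?_cons] at h
    split at h
    · cases h; assumption
    · exact ih h

theorem pv_get?_TP (t : String) (p : Int) (h : TERM_PRIORITY.get? t = some p) :
    t ∈ pvGroup p ∧ 0 ≤ p ∧ p ≤ 6 := by
  simp only [PySem.Dict.get?] at h
  obtain ⟨⟨t', p'⟩, hfind, hmap⟩ := Option.map_eq_some_iff.mp h
  obtain rfl : p' = p := hmap
  have hbeq : (t' == t) = true := pv_find?_pred (fun q => q.1 == t) _ (t', p') hfind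
  have hmem := List.mem_of_find?_eq_some hfind
  obtain rfl : t' = t := eq_of_beq hbeq
  have hit : TERM_PRIORITY.items =
    [("walmart", (0 : Int)), ("target", 0),
     ("whole foods", 1), ("kroger", 1), ("safeway", 1), ("trader joe", 1),
     ("starbucks", 2), ("mcdonald", 2), ("chipotle", 2), ("olive garden", 2), ("pizza", 2),
     ("shell", 3), ("exxon", 3), ("chevron", 3), ("bp", 3), ("gas", 3),
     ("netflix", 4), ("spotify", 4), ("disney", 4), ("hulu", 4), ("youtube premium", 4),
     ("electric", 5), ("water", 5), ("utility", 5), ("internet", 5), ("phone company", 5),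
     ("amazon", 6), ("best buy", 6), ("macy", 6), ("home depot", 6)] := rfl
  rw [hit] at hmem
  fin_cases hmem <;> decide

theorem pv_mem_group (k : Int) (t : String) (ht : t ∈ pvGroup k) :
    TERM_PRIORITY.get? t = some k ∧ 2 ≤ t.toList.length ∧ t.toList.length ≤ 15 := by
  unfold pvGroup at ht
  split_ifs at ht <;> subst_vars <;> fin_cases ht <;> decide

theorem pv_best_le (ml : String) (t : String) (p : Int)
    (hget : TERM_PRIORITY.get? t = some p)
    (h2 : 2 ≤ t.toList.length) (h15 : t.toList.length ≤ 15)
    (hin : PySem.Str.isIn t ml = true) :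
    pvBest ml (PySem.Str.len ml) ≤ p := by
  rw [PySem.Str.isIn_eq] at hin
  obtain ⟨j, hj⟩ := (PySem.Chars.exists_prefix_drop_iff_isIn t.toList ml.toList).mpr hin
  have hjlen : t.toList.length ≤ ml.toList.length - j := by
    have := hj.length_le; simpa [List.length_drop] using this
  have hjn : j < ml.toList.length := by omega
  have hslice : PySem.Str.slice ml (some (j : Int)) (some ((j : Int) + (t.toList.length : Int))) = t := by
    rw [← String.toList_inj, PySem.Str.toList_slice, PySem.Chars.slice_eq_listSlice,
      PySem.List.slice_natCast_add]
    exact (List.prefix_iff_eq_take.mp hj).symm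
  have hn : PySem.Str.len ml = (ml.toList.length : Int) := rfl
  have hcand : pvCand ml (PySem.Str.len ml) (j : Int) (t.toList.length : Int) = some p := by
    unfold pvCand
    rw [if_pos (by rw [hn]; omega)]
    rw [hslice]; exact hget
  have hmem : ((j : Int), (t.toList.length : Int)) ∈ pvPairs (PySem.Str.len ml) := by
    unfold pvPairs
    refine List.mem_flatMap.mpr ⟨(j : Int), ?_, List.mem_map.mpr ⟨(t.toList.length : Int), ?_, rfl⟩⟩
    · rw [PySem.List.mem_pyRange_one, hn]; constructor <;> omega
    · rw [PySem.List.mem_pyRange_one]; constructor <;> omega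
  rw [pvBest_eq_fold]
  exact pvFold_le_cand ml _ _ _ p hmem hcand

theorem pv_cand_isIn (ml : String) (i L p : Int)
    (hi0 : 0 ≤ i) (hL2 : 2 ≤ L)
    (hc : pvCand ml (PySem.Str.len ml) i L = some p) :
    ∃ t : String, TERM_PRIORITY.get? t = some p ∧ PySem.Str.isIn t ml = true := by
  unfold pvCand at hc
  split at hc
  · refine ⟨PySem.Str.slice ml (some i) (some (i + L)), hc, ?_⟩
    rw [PySem.Str.isIn_iff_infix, PySem.Str.toList_slice, PySem.Chars.slice_eq_listSlice]
    rw [PySem.List.slice_toNat _ hi0 (by omega : (0 : Int) ≤ i + L)]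
    exact ((List.take_prefix _ _).isInfix).trans ((List.drop_suffix _ _).isInfix)
  · cases hc

theorem pv_best_le_G (ml : String) (k : Int) (h : pvG ml k = true) :
    pvBest ml (PySem.Str.len ml) ≤ k := by
  obtain ⟨t, htg, hin⟩ := List.any_eq_true.mp h
  obtain ⟨hget, hl2, hl15⟩ := pv_mem_group k t htg
  exact pv_best_le ml t k hget hl2 hl15 hin

theorem pv_chain_le (ml : String) (k : Int) (h0 : 0 ≤ k) (h6 : k ≤ 6) (hG : pvG ml k = true) :
    pvChain ml ≤ k := by
  unfold pvChain
  interval_cases k <;> split_ifs <;> omega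

theorem pv_key (ml : String) : pvBest ml (PySem.Str.len ml) = pvChain ml := by
  apply le_antisymm
  · unfold pvChain
    split_ifs with h0 h1 h2 h3 h4 h5 h6
    · exact pv_best_le_G ml 0 h0
    · exact pv_best_le_G ml 1 h1
    · exact pv_best_le_G ml 2 h2
    · exact pv_best_le_G ml 3 h3
    · exact pv_best_le_G ml 4 h4
    · exact pv_best_le_G ml 5 h5
    · exact pv_best_le_G ml 6 h6
    · rw [pvBest_eq_fold]; exact pvFold_le7 ml _
  · rw [pvBest_eq_fold]
    rcases pvFold_cases ml (PySem.Str.len ml) with h | ⟨⟨i, L⟩, hmem, hc⟩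
    · rw [h]; unfold pvChain; split_ifs <;> omega
    · unfold pvPairs at hmem
      obtain ⟨i', hi', hm⟩ := List.mem_flatMap.mp hmem
      obtain ⟨L', hL', heq⟩ := List.mem_map.mp hm
      cases heq
      have hi0 : 0 ≤ i := ((PySem.List.mem_pyRange_one).mp hi').1
      have hL2 : 2 ≤ L := ((PySem.List.mem_pyRange_one).mp hL').1
      obtain ⟨t, hget, hin⟩ := pv_cand_isIn ml i L _ hi0 hL2 hc
      obtain ⟨htg, hp0, hp6⟩ := pv_get?_TP t _ hget
      exact pv_chain_le ml _ hp0 hp6 (List.any_eq_true.mpr ⟨t, htg, hin⟩)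

-- group-level readings of A's conditions
theorem pvG_eq0 (ml : String) :
    pvG ml 0 = (PySem.Str.isIn "walmart" ml || PySem.Str.isIn "target" ml) := by
  have h : pvGroup 0 = ["walmart", "target"] := by decide
  simp [pvG, h]

theorem pv_e1 (ml : String) :
    (["whole foods", "kroger", "safeway", "trader joe", "walmart", "target"].any
      (fun t => PySem.Str.isIn t ml)) = (pvG ml 1 || pvG ml 0) := by
  have h0 : pvGroup 0 = ["walmart", "target"] := by decide
  have h1 : pvGroup 1 = ["whole foods", "kroger", "safeway", "trader joe"] := by decide
  simp [pvG, h0, h1, Bool.or_assoc]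

theorem pv_e2 (ml : String) :
    (["starbucks", "mcdonald", "chipotle", "olive garden", "pizza"].any
      (fun t => PySem.Str.isIn t ml)) = pvG ml 2 := by
  have h : pvGroup 2 = ["starbucks", "mcdonald", "chipotle", "olive garden", "pizza"] := by decide
  simp [pvG, h]

theorem pv_e3 (ml : String) :
    (["shell", "exxon", "chevron", "bp", "gas"].any (fun t => PySem.Str.isIn t ml)) = pvG ml 3 := by
  have h : pvGroup 3 = ["shell", "exxon", "chevron", "bp", "gas"] := by decide
  simp [pvG, h]

theorem pv_e4 (ml : String) :
    (["netflix", "spotify", "disney", "hulu", "youtube premium"].any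
      (fun t => PySem.Str.isIn t ml)) = pvG ml 4 := by
  have h : pvGroup 4 = ["netflix", "spotify", "disney", "hulu", "youtube premium"] := by decide
  simp [pvG, h]

theorem pv_e5 (ml : String) :
    (["electric", "water", "utility", "internet", "phone company"].any
      (fun t => PySem.Str.isIn t ml)) = pvG ml 5 := by
  have h : pvGroup 5 = ["electric", "water", "utility", "internet", "phone company"] := by decide
  simp [pvG, h]

theorem pv_e6 (ml : String) :
    (["amazon", "best buy", "macy", "home depot"].any (fun t => PySem.Str.isIn t ml)) = pvG ml 6 := by
  have h : pvGroup 6 = ["amazon", "best buy", "macy", "home depot"] := by decide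
  simp [pvG, h]

-- ===== VERDICT (by name: the statement is the Claim_ definition above) =====
theorem get_category_for_merchant_spec : Claim_equal_get_category_for_merchant := by
  intro m ch _
  unfold Spec_get_category_for_merchant
  simp only [get_category_for_merchant, get_category_for_merchant_alt]
  rw [pv_key]
  rw [show (PySem.Str.isIn "walmart" (PySem.Str.lower m) || PySem.Str.isIn "target" (PySem.Str.lower m)) = pvG (PySem.Str.lower m) 0 from (pvG_eq0 _).symm]
  rw [pv_e1, pv_e2, pv_e3, pv_e4, pv_e5, pv_e6]
  cases h0 : pvG (PySem.Str.lower m) 0 <;> cases h1 : pvG (PySem.Str.lower m) 1 <;>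
    cases h2 : pvG (PySem.Str.lower m) 2 <;> cases h3 : pvG (PySem.Str.lower m) 3 <;>
    cases h4 : pvG (PySem.Str.lower m) 4 <;> cases h5 : pvG (PySem.Str.lower m) 5 <;>
    cases h6 : pvG (PySem.Str.lower m) 6 <;>
    simp [pvChain, h0, h1, h2, h3, h4, h5, h6, CATEGORY_BY_PRIORITY, PySem.List.pyGet?,
      PySem.List.pyIdx?]
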